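-- pv_equiv track=rewrite | github.com/boss413/gastrometric | scripts/extract_pdf.py | chars_to_words
-- ===== SOURCE A (Python) =====
-- def chars_to_words(chars):
--     words = []
--     current = []
--
--     for c in chars:
--         if c["text"].isspace():
--             if current:
--                 words.append(current)
--                 current = []
--         else:
--             current.append(c)
--
--     if current:
--         words.append(current)
--
--     return words
-- ===== SOURCE B (Python) =====
-- def chars_to_words(chars):
--     # Recursive run-splitting: skip leading space chars, otherwise cut off the
--     # maximal non-space run as one word and recurse on the remainder.
--     if not chars:
--         return []
--     if chars[0]["text"].isspace():
--         return chars_to_words(chars[1:])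
--     i = 1
--     while i < len(chars) and not chars[i]["text"].isspace():
--         i += 1
--     return [chars[:i]] + chars_to_words(chars[i:])
-- ===== Notes on version B (the rewrite author's own statement) =====
-- stated objective: alternative
-- what changed: Replaces A's single accumulator loop with explicit current-buffer and end-of-loop flush by structural recursion that skips space runs and cuts off each maximal non-space run as a word.
import Mathlib
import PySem

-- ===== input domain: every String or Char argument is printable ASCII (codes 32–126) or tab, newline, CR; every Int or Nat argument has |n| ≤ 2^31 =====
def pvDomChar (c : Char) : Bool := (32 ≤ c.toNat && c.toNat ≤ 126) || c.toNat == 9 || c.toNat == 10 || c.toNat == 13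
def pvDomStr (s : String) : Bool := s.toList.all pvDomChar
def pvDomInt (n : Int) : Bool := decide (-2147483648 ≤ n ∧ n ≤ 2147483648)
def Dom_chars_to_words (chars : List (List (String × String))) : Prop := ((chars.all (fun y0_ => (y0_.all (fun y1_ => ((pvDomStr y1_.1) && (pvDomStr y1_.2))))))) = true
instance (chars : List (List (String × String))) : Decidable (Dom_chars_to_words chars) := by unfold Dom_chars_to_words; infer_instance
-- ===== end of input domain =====

-- B replaces A's accumulator loop (with its end-of-loop flush) by recursion that cuts off
-- each maximal non-space run as one word; equal return values on Pre_ are proved below.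

-- ===== PORT A =====
-- shared helper: c["text"].isspace() (the "" default is never used under Pre_)
def pvIsSpace (c : List (String × String)) : Bool :=
  PySem.Str.strIsspace (PySem.Dict.getD (PySem.Dict.ofList c) "text" "")

-- the body of A's for-loop, state = (words, current)
def pvStepA (st : List (List (List (String × String))) × List (List (String × String)))
    (c : List (String × String)) :
    List (List (List (String × String))) × List (List (String × String)) :=
  if pvIsSpace c then
    if st.2 ≠ [] then (st.1 ++ [st.2], []) else st
  else (st.1, st.2 ++ [c])

def chars_to_words (chars : List (List (String × String))) : List (List (List (String × String))) :=
  let st := chars.foldl pvStepA ([], [])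
  if st.2 ≠ [] then st.1 ++ [st.2] else st.1

-- ===== PORT B =====
-- Source B: skip a leading space char; otherwise chars[:i] (the maximal non-space run,
-- found by the index while-loop = takeWhile) is a word, recurse on chars[i:] (= dropWhile).
def chars_to_words_alt : List (List (String × String)) → List (List (List (String × String)))
  | [] => []
  | c :: rest =>
    if pvIsSpace c then chars_to_words_alt rest
    else
      (c :: rest.takeWhile (fun d => !pvIsSpace d)) ::
        chars_to_words_alt (rest.dropWhile (fun d => !pvIsSpace d))
termination_by l => l.length
decreasing_by
  · simp
  · simpa using Nat.lt_succ_of_le (List.length_dropWhile_le _ _)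

-- ===== PRECONDITION & SPEC =====
-- Pre_ excludes chars containing a dict without a "text" key, on which A raises KeyError.
def Pre_chars_to_words (chars : List (List (String × String))) : Prop :=
  ∀ c ∈ chars, PySem.Dict.contains (PySem.Dict.ofList c) "text" = true
instance (chars : List (List (String × String))) : Decidable (Pre_chars_to_words chars) := by
  unfold Pre_chars_to_words; infer_instance

def pvWitness_chars_to_words : (List (List (String × String))) :=
  [[("text", "a"), ("size", "10")], [("text", " ")], [("text", "b")]]

def Spec_chars_to_words (chars : List (List (String × String))) (out : List (List (List (String × String)))) : Prop := out = chars_to_words_alt chars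
instance (chars : List (List (String × String))) (out : List (List (List (String × String)))) : Decidable (Spec_chars_to_words chars out) := by unfold Spec_chars_to_words; infer_instance

-- ===== CLAIM (what is proved, stated in full; the proofs are below) =====
def Claim_equal_chars_to_words : Prop := ∀ (chars : List (List (String × String))), Dom_chars_to_words chars → Pre_chars_to_words chars → Spec_chars_to_words chars (chars_to_words chars)

-- ===== LEMMAS AND PROOFS =====

-- intermediate form: A's loop continued from pending buffer `cur`
def pvH : List (List (String × String)) → List (List (String × String)) → List (List (List (String × String)))
  | cur, [] => if cur = [] then [] else [cur]
  | cur, c :: rest =>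
    if pvIsSpace c then (if cur = [] then [] else [cur]) ++ pvH [] rest
    else pvH (cur ++ [c]) rest

theorem foldA_eq_pvH (chars : List (List (String × String))) :
    ∀ words cur,
      (let st := List.foldl pvStepA (words, cur) chars;
       if st.2 ≠ [] then st.1 ++ [st.2] else st.1) = words ++ pvH cur chars := by
  induction chars with
  | nil =>
    intro words cur
    by_cases h : cur = [] <;> simp [pvH, h]
  | cons c rest ih =>
    intro words cur
    by_cases hs : pvIsSpace c
    · by_cases hc : cur = []
      · simp [List.foldl_cons, pvStepA, hs, hc, pvH, ih]
      · simp only [List.foldl_cons, pvStepA, hs, if_pos rfl, hc, if_true, ne_eq,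
          not_false_eq_true, ite_true, pvH, if_neg hc]
        rw [ih]
        simp
    · simp only [List.foldl_cons, pvStepA, hs, Bool.false_eq_true, if_false, pvH]
      exact ih words (cur ++ [c])

theorem pvH_eq_alt (chars : List (List (String × String))) :
    ∀ cur, pvH cur chars =
      if cur = [] then chars_to_words_alt chars
      else (cur ++ chars.takeWhile (fun d => !pvIsSpace d)) ::
        chars_to_words_alt (chars.dropWhile (fun d => !pvIsSpace d)) := by
  induction chars with
  | nil =>
    intro cur
    by_cases h : cur = [] <;> simp [pvH, h, chars_to_words_alt]
  | cons c rest ih =>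
    intro cur
    by_cases hs : pvIsSpace c
    · by_cases hc : cur = [] <;>
        simp [pvH, hs, hc, ih, chars_to_words_alt, List.takeWhile, List.dropWhile]
    · have h1 := ih (cur ++ [c])
      have h2 := ih ([c])
      by_cases hc : cur = []
      · simp [pvH, hs, hc, chars_to_words_alt, List.takeWhile, List.dropWhile, h2]
      · simp only [pvH, hs, Bool.false_eq_true, if_false, h1, List.append_eq_nil_iff, hc,
          false_and, if_neg, if_neg hc, List.takeWhile, List.dropWhile, Bool.not_false,
          if_true, Bool.not_eq_eq_eq_not, chars_to_words_alt]
        simp [hs]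

-- ===== VERDICT (by name: the statement is the Claim_ definition above) =====
theorem chars_to_words_spec : Claim_equal_chars_to_words := by
  intro chars _ _
  unfold Spec_chars_to_words chars_to_words
  rw [foldA_eq_pvH chars [] []]
  simp [pvH_eq_alt]
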